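-- pv_equiv track=rewrite | github.com/pypi-data/pypi-mirror-371 | packages/git-ai-reporter/git_ai_reporter-0.1.0-py3-none-any.whl/git_ai_reporter/writing/content_formatting.py | clean_markdown_content
-- ===== SOURCE A (Python) =====
-- def clean_markdown_content(content: str) -> str:
--     """Clean and normalize markdown content.
--
--     Args:
--         content: Raw markdown content.
--
--     Returns:
--         Cleaned markdown content.
--     """
--     # Remove excessive whitespace
--     lines = content.split("\n")
--     cleaned_lines = []
--
--     prev_empty = False
--     for line in lines:
--         # Skip multiple consecutive empty lines
--         if not line.strip():
--             if not prev_empty: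
--                 cleaned_lines.append("")
--             prev_empty = True
--         else:
--             cleaned_lines.append(line.rstrip())  # Remove trailing whitespace
--             prev_empty = False
--
--     # Remove trailing empty lines
--     for _ in range(len(cleaned_lines)):
--         if cleaned_lines and not cleaned_lines[-1]:
--             cleaned_lines.pop()
--         else:
--             break
--
--     return "\n".join(cleaned_lines)
-- ===== SOURCE B (Python) =====
-- def clean_markdown_content(content: str) -> str:
--     """Clean and normalize markdown content.
--
--     Paragraph view: split the document into maximal blocks of non-blank
--     (rstripped) lines, join each block with newlines, join the blocks with
--     blank-line separators, and prepend one blank line if the document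
--     started with a blank line.
--     """
--     lines = [ln.rstrip() for ln in content.split("\n")]
--     paragraphs = []
--     i, n = 0, len(lines)
--     while i < n:
--         if not lines[i]:
--             i += 1
--             continue
--         j = i
--         while j < n and lines[j]:
--             j += 1
--         paragraphs.append("\n".join(lines[i:j]))
--         i = j
--     if not paragraphs:
--         return ""
--     prefix = "\n" if not lines[0] else ""
--     return prefix + "\n\n".join(paragraphs)
-- ===== Notes on version B (the rewrite author's own statement) =====
-- stated objective: alternative
-- what changed: Replaces A's prev_empty flag machine plus trailing pop-loop with a paragraph decomposition: collect maximal blocks of non-blank rstripped lines, join each block with newlines, join blocks with blank-line separators, and prepend one blank line when the document opens blank.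
import Mathlib
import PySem

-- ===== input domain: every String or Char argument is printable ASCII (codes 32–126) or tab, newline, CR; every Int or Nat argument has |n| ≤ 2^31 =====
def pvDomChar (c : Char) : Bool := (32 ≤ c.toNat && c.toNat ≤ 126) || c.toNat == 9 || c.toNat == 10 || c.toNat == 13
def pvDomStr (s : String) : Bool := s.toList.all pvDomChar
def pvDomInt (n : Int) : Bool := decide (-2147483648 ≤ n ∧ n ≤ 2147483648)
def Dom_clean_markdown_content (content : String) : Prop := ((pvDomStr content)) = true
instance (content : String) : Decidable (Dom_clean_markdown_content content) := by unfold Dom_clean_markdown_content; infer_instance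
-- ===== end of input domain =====

-- B recasts A's prev_empty flag machine as a paragraph decomposition: split into maximal blocks of
-- non-blank (rstripped) lines, join blocks with blank-line separators, prepend one blank if the
-- document opened blank (alternative decomposition; same asymptotic cost).


-- ===== PORT A =====
-- A's trailing cleanup: 'for _ in range(len(cleaned_lines)): if cleaned_lines and not cleaned_lines[-1]: pop else break'
-- (the getLast? = some "" test is exactly 'cleaned_lines and not cleaned_lines[-1]')
def cmcPopLoop : Nat → List String → List String
  | 0, acc => acc
  | n + 1, acc => if acc.getLast? = some "" then cmcPopLoop n acc.dropLast else acc

def clean_markdown_content (content : String) : String :=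
  let lines := (PySem.Chars.splitOn content.toList "\n".toList).map String.ofList
  let st := lines.foldl
    (fun (st : List String × Bool) line =>
      if PySem.Str.strip line = "" then
        (if st.2 = false then st.1 ++ [""] else st.1, true)
      else
        (st.1 ++ [PySem.Str.rstrip line], false))
    ([], false)
  PySem.Str.join "\n" (cmcPopLoop st.1.length st.1)

-- ===== PORT B =====
-- Source B's outer while loop over the index i: skip a blank line, or scan the maximal run of
-- non-blank lines (the inner 'while j < n and lines[j]' = takeWhile) and append it joined,
-- continuing at j (= dropWhile).  Transcribed as the recursion on the remaining lines.
def cmcParas : List String → List String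
  | [] => []
  | l :: ls =>
    if l = "" then cmcParas ls
    else PySem.Str.join "\n" (l :: ls.takeWhile (fun x => x != "")) ::
         cmcParas (ls.dropWhile (fun x => x != ""))
termination_by xs => xs.length
decreasing_by
  · simp
  · exact Nat.lt_succ_of_le (List.length_dropWhile_le _ _)

def clean_markdown_content_alt (content : String) : String :=
  let lines := ((PySem.Chars.splitOn content.toList "\n".toList).map String.ofList).map PySem.Str.rstrip
  let paragraphs := cmcParas lines
  if paragraphs = [] then ""
  else if lines.head? = some "" then
    -- 'prefix + "\n\n".join(paragraphs)' with prefix = "\n", concatenation done on the char list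
    String.ofList ('\n' :: (PySem.Str.join "\n\n" paragraphs).toList)
  else PySem.Str.join "\n\n" paragraphs

-- ===== PRECONDITION & SPEC =====
def Spec_clean_markdown_content (content : String) (out : String) : Prop := out = clean_markdown_content_alt content
instance (content : String) (out : String) : Decidable (Spec_clean_markdown_content content out) := by unfold Spec_clean_markdown_content; infer_instance

-- ===== CLAIM (what is proved, stated in full; the proofs are below) =====
def Claim_equal_clean_markdown_content : Prop := ∀ (content : String), Dom_clean_markdown_content content → Spec_clean_markdown_content content (clean_markdown_content content)

-- ===== LEMMAS AND PROOFS =====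

-- what A's flag-fold produces: one "" per run of blank lines, each non-blank line rstripped
def cmcRuns : List String → List String
  | [] => []
  | l :: ls =>
    if l = "" then "" :: cmcRuns (ls.dropWhile (fun x => x = ""))
    else l :: cmcRuns ls
termination_by xs => xs.length
decreasing_by
  · exact Nat.lt_succ_of_le (List.length_dropWhile_le _ _)
  · simp

-- what A's pop loop produces: drop the maximal "" suffix
def cmcTrimR (xs : List String) : List String :=
  (xs.reverse.dropWhile (fun x => x = "")).reverse

-- B's blocks at the line level: maximal runs of non-"" lines
def cmcBlocks : List String → List (List String)
  | [] => []
  | l :: ls =>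
    if l = "" then cmcBlocks ls
    else (l :: ls.takeWhile (fun x => x != "")) :: cmcBlocks (ls.dropWhile (fun x => x != ""))
termination_by xs => xs.length
decreasing_by
  · simp
  · exact Nat.lt_succ_of_le (List.length_dropWhile_le _ _)

-- blocks separated by single "" lines
def cmcInterB : List (List String) → List String
  | [] => []
  | [p] => p
  | p :: q :: ps => p ++ [""] ++ cmcInterB (q :: ps)

lemma rstrip_nil_iff (cs : List Char) :
    PySem.Chars.rstrip cs = [] ↔ ∀ c ∈ cs, PySem.Chars.isspace c = true := by
  simp [PySem.Chars.rstrip, List.dropWhile_eq_nil_iff]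

-- A's emptiness test ('not line.strip()') agrees with B's on the rstripped line
lemma strip_empty_iff_rstrip_empty (l : String) :
    (PySem.Str.strip l = "") ↔ (PySem.Str.rstrip l = "") := by
  simp only [PySem.Str.strip, PySem.Str.rstrip, String.ofList_eq_empty_iff,
    PySem.Chars.strip, rstrip_nil_iff, PySem.Chars.lstrip]
  constructor
  · intro h c hc
    have hsplit : c ∈ List.takeWhile PySem.Chars.isspace l.toList ++
        List.dropWhile PySem.Chars.isspace l.toList := by
      rw [List.takeWhile_append_dropWhile]; exact hc
    rcases List.mem_append.mp hsplit with h1 | h2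
    · exact List.mem_takeWhile_imp h1
    · exact h c h2
  · intro h c hc
    exact h c ((List.dropWhile_sublist _).mem hc)

-- A's fold over the raw lines builds exactly cmcRuns of the rstripped lines
lemma foldA_eq_runs (L : List String) :
    (∀ acc : List String,
      (L.foldl (fun (st : List String × Bool) line =>
        if PySem.Str.strip line = "" then
          (if st.2 = false then st.1 ++ [""] else st.1, true)
        else
          (st.1 ++ [PySem.Str.rstrip line], false)) (acc, false)).1
      = acc ++ cmcRuns (L.map PySem.Str.rstrip)) ∧
    (∀ acc : List String,
      (L.foldl (fun (st : List String × Bool) line =>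
        if PySem.Str.strip line = "" then
          (if st.2 = false then st.1 ++ [""] else st.1, true)
        else
          (st.1 ++ [PySem.Str.rstrip line], false)) (acc, true)).1
      = acc ++ cmcRuns ((L.map PySem.Str.rstrip).dropWhile (fun x => x = ""))) := by
  induction L with
  | nil => simp [cmcRuns]
  | cons l ls ih =>
    by_cases hl : PySem.Str.strip l = ""
    · have hr : PySem.Str.rstrip l = "" := (strip_empty_iff_rstrip_empty l).mp hl
      constructor
      · intro acc
        simp only [List.foldl_cons, if_pos hl, List.map_cons, hr, reduceIte]
        rw [ih.2 (acc ++ [""]), cmcRuns, if_pos rfl]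
        simp
      · intro acc
        simp only [List.foldl_cons, if_pos hl, List.map_cons, hr, Bool.true_eq_false, if_false]
        rw [ih.2 acc, List.dropWhile_cons_of_pos (by simp)]
    · have hr : PySem.Str.rstrip l ≠ "" := fun h => hl ((strip_empty_iff_rstrip_empty l).mpr h)
      constructor
      · intro acc
        simp only [List.foldl_cons, if_neg hl, List.map_cons]
        rw [ih.1 (acc ++ [PySem.Str.rstrip l]), cmcRuns, if_neg hr]
        simp
      · intro acc
        simp only [List.foldl_cons, if_neg hl, List.map_cons]
        rw [ih.1 (acc ++ [PySem.Str.rstrip l]),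
          List.dropWhile_cons_of_neg (by simp [hr]), cmcRuns, if_neg hr]
        simp

-- A's bounded pop loop, with fuel at least the list length, drops the maximal "" suffix
lemma popLoop_eq_trim (n : Nat) (xs : List String) (h : xs.length ≤ n) :
    cmcPopLoop n xs = cmcTrimR xs := by
  induction n generalizing xs with
  | zero =>
    have : xs = [] := List.eq_nil_of_length_eq_zero (Nat.le_zero.mp h)
    subst this; rfl
  | succ n ih =>
    rw [cmcPopLoop]
    by_cases hl : xs.getLast? = some ""
    · rw [if_pos hl]
      obtain ⟨ys, rfl⟩ := List.getLast?_eq_some_iff.mp hl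
      rw [ih _ (by simpa using Nat.le_of_succ_le_succ (by simpa using h))]
      unfold cmcTrimR
      rw [List.reverse_append, List.reverse_singleton, List.singleton_append,
        List.dropWhile_cons_of_pos (by simp), List.dropLast_concat]
    · rw [if_neg hl]
      unfold cmcTrimR
      cases hx : xs.reverse with
      | nil => simpa using congrArg List.reverse hx
      | cons a as =>
        have ha : a ≠ "" := by
          intro h0
          apply hl
          rw [← List.head?_reverse, hx, h0]; rfl
        rw [List.dropWhile_cons_of_neg (by simpa using ha), ← hx, List.reverse_reverse]

lemma trimR_cons_of_ne (a : String) (xs : List String) (h : cmcTrimR xs ≠ []) :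
    cmcTrimR (a :: xs) = a :: cmcTrimR xs := by
  unfold cmcTrimR at *
  rw [List.reverse_cons, List.dropWhile_append]
  rcases hdw : xs.reverse.dropWhile (fun x => x = "") with _ | ⟨c, cs⟩
  · exact absurd (by rw [hdw]; rfl) h
  · simp

lemma trimR_append_of_nil (xs ys : List String) (h : cmcTrimR ys = []) :
    cmcTrimR (xs ++ ys) = cmcTrimR xs := by
  unfold cmcTrimR at *
  have h0 : ys.reverse.dropWhile (fun x => x = "") = [] := by
    simpa using congrArg List.reverse h
  rw [List.reverse_append, List.dropWhile_append, h0]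
  simp

lemma trimR_of_all_ne (xs : List String) (h : ∀ x ∈ xs, x ≠ "") :
    cmcTrimR xs = xs := by
  unfold cmcTrimR
  cases hx : xs.reverse with
  | nil => simpa using congrArg List.reverse hx
  | cons a as =>
    have ha : a ≠ "" := h a (by
      have : a ∈ xs.reverse := by rw [hx]; simp
      simpa using this)
    rw [List.dropWhile_cons_of_neg (by simpa using ha), ← hx, List.reverse_reverse]

lemma trimR_append_of_ne (xs ys : List String) (h : cmcTrimR ys ≠ []) :
    cmcTrimR (xs ++ ys) = xs ++ cmcTrimR ys := by
  induction xs with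
  | nil => rfl
  | cons a as ih =>
    rw [List.cons_append, trimR_cons_of_ne a (as ++ ys) (by rw [ih]; simp [h]), ih,
      List.cons_append]

-- cmcBlocks skips leading blanks wholesale
lemma blocks_dropWhile (ls : List String) :
    cmcBlocks (ls.dropWhile (fun x => x = "")) = cmcBlocks ls := by
  induction ls with
  | nil => rfl
  | cons l t ih =>
    by_cases hl : l = ""
    · rw [List.dropWhile_cons_of_pos (by simp [hl]), ih, cmcBlocks, if_pos hl]
    · rw [List.dropWhile_cons_of_neg (by simp [hl])]

lemma interB_ne_nil (bs : List (List String)) (hb : ∀ b ∈ bs, b ≠ []) (h : bs ≠ []) :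
    cmcInterB bs ≠ [] := by
  match bs with
  | [] => exact absurd rfl h
  | [p] => simpa [cmcInterB] using hb p (by simp)
  | p :: q :: ps => simp [cmcInterB]

-- every block is a nonempty list
lemma mem_blocks_ne_nil (L : List String) : ∀ b ∈ cmcBlocks L, b ≠ [] := by
  induction L using cmcBlocks.induct with
  | case1 => simp [cmcBlocks]
  | case2 ls ih =>
    intro b hbmem
    rw [cmcBlocks, if_pos rfl] at hbmem
    exact ih b hbmem
  | case3 l ls hl ih =>
    intro b hbmem
    rw [cmcBlocks, if_neg hl] at hbmem
    rcases List.mem_cons.mp hbmem with rfl | hmem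
    · simp
    · exact ih b hmem

-- runs of a list starting with a non-blank prefix
lemma runs_append_of_ne (P D : List String) (hP : ∀ x ∈ P, x ≠ "") :
    cmcRuns (P ++ D) = P ++ cmcRuns D := by
  induction P with
  | nil => rfl
  | cons p ps ih =>
    rw [List.cons_append, cmcRuns, if_neg (hP p (by simp)), ih (fun x hx => hP x (by simp [hx]))]
    rfl

-- the key structural bridge: A's trimmed runs = B's blocks with "" separators (plus a leading "")
lemma trim_runs_eq_blocks_aux (n : Nat) :
    ∀ L : List String, L.length ≤ n →
    cmcTrimR (cmcRuns L) =
      if cmcBlocks L = [] then []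
      else (if L.head? = some "" then [""] else []) ++ cmcInterB (cmcBlocks L) := by
  induction n with
  | zero =>
    intro L hL
    have : L = [] := List.eq_nil_of_length_eq_zero (Nat.le_zero.mp hL)
    subst this; simp [cmcRuns, cmcBlocks, cmcTrimR]
  | succ n ih =>
    intro L hL
    match L with
    | [] => simp [cmcRuns, cmcBlocks, cmcTrimR]
    | l :: ls =>
      have hls : ls.length ≤ n := by simpa using Nat.le_of_succ_le_succ (by simpa using hL)
      by_cases hl : l = ""
      · subst hl
        rw [cmcRuns, if_pos rfl]
        set M := ls.dropWhile (fun x => x = "") with hM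
        have hMlen : M.length ≤ n := le_trans (List.length_dropWhile_le _ _) hls
        have hblocks : cmcBlocks M = cmcBlocks ("" :: ls) := by
          rw [cmcBlocks, if_pos rfl]; exact blocks_dropWhile ls
        by_cases hB : cmcBlocks M = []
        · have hIH := ih M hMlen
          rw [if_pos hB] at hIH
          have h2 : cmcTrimR ([""] ++ cmcRuns M) = cmcTrimR [""] := trimR_append_of_nil _ _ hIH
          rw [List.singleton_append] at h2
          rw [h2, ← hblocks, if_pos hB]; rfl
        · have hIH := ih M hMlen
          rw [if_neg hB] at hIH
          have hMhead : ¬ M.head? = some "" := by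
            cases hMc : M with
            | nil => simp
            | cons m ms =>
              have hh := List.head?_dropWhile_not (fun x => decide (x = "")) ls
              rw [← hM, hMc] at hh
              simp only [List.head?_cons] at hh
              simp at hh
              simp [hh]
          rw [if_neg hMhead, List.nil_append] at hIH
          have hne : cmcTrimR (cmcRuns M) ≠ [] := by
            rw [hIH]
            exact interB_ne_nil _ (mem_blocks_ne_nil M) hB
          rw [trimR_cons_of_ne _ _ hne, hIH, ← hblocks, if_neg hB]
          simp
      · have hsplit : ls.takeWhile (fun x => x != "") ++ ls.dropWhile (fun x => x != "") = ls :=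
          List.takeWhile_append_dropWhile
        set T := ls.takeWhile (fun x => x != "") with hT
        set D := ls.dropWhile (fun x => x != "") with hD
        have hTmem : ∀ x ∈ T, x ≠ "" := by
          intro x hx
          have := List.mem_takeWhile_imp hx
          simpa using this
        have hDlen : D.length ≤ n := le_trans (List.length_dropWhile_le _ _) hls
        have hruns : cmcRuns (l :: ls) = l :: T ++ cmcRuns D := by
          rw [cmcRuns, if_neg hl, ← hsplit, runs_append_of_ne _ _ hTmem]; rfl
        have hblocks : cmcBlocks (l :: ls) = (l :: T) :: cmcBlocks D := by
          rw [cmcBlocks, if_neg hl]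
        by_cases hB : cmcBlocks D = []
        · have hIH := ih D hDlen
          rw [if_pos hB] at hIH
          rw [hruns, ← List.singleton_append,
            trimR_append_of_nil _ _ hIH, List.singleton_append,
            trimR_of_all_ne _ (by
              intro x hx
              rcases List.mem_cons.mp hx with rfl | hx'
              · exact hl
              · exact hTmem x hx'),
            hblocks, hB]
          simp [cmcInterB, hl]
        · have hIH := ih D hDlen
          rw [if_neg hB] at hIH
          have hDhead : D.head? = some "" := by
            cases hDc : D with
            | nil => rw [hDc] at hB; simp [cmcBlocks] at hB
            | cons d ds =>
              have hh := List.head?_dropWhile_not (fun x => x != "") ls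
              rw [← hD, hDc] at hh
              simp only [List.head?_cons] at hh
              simp at hh
              simp [hh]
          rw [hDhead, if_pos rfl] at hIH
          have hne : cmcTrimR (cmcRuns D) ≠ [] := by rw [hIH]; simp
          obtain ⟨q, ps, hqs⟩ : ∃ q ps, cmcBlocks D = q :: ps := by
            cases hc : cmcBlocks D with
            | nil => exact absurd hc hB
            | cons q ps => exact ⟨q, ps, rfl⟩
          rw [hruns, ← List.singleton_append,
            trimR_append_of_ne _ _ hne, hIH, hblocks, hqs, List.singleton_append]
          simp [cmcInterB, hl]

lemma trim_runs_eq_blocks (L : List String) :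
    cmcTrimR (cmcRuns L) =
      if cmcBlocks L = [] then []
      else (if L.head? = some "" then [""] else []) ++ cmcInterB (cmcBlocks L) :=
  trim_runs_eq_blocks_aux L.length L (le_refl _)

lemma chars_join_append (sep : List Char) (xs ys : List (List Char))
    (hx : xs ≠ []) (hy : ys ≠ []) :
    PySem.Chars.join sep (xs ++ ys) =
      PySem.Chars.join sep xs ++ sep ++ PySem.Chars.join sep ys := by
  match xs, ys with
  | [x], y :: ys' =>
    rw [List.singleton_append, PySem.Chars.join_cons_cons, PySem.Chars.join_singleton]
  | x :: x' :: xs', ys =>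
    cases ys with
    | nil => exact absurd rfl hy
    | cons y ys' =>
      have h1 : (x :: x' :: xs') ++ y :: ys' = x :: ((x' :: xs') ++ y :: ys') := rfl
      have h2 : (x' :: xs') ++ y :: ys' = x' :: (xs' ++ y :: ys') := rfl
      rw [h1, h2, PySem.Chars.join_cons_cons, ← h2,
        chars_join_append sep (x' :: xs') (y :: ys') (by simp) (by simp),
        PySem.Chars.join_cons_cons]
      simp

-- join by newline over blank-separated blocks = join the blocks by double newline
lemma join_interB (bs : List (List String)) (hb : ∀ b ∈ bs, b ≠ []) (h : bs ≠ []) :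
    PySem.Chars.join ['\n'] ((cmcInterB bs).map String.toList) =
      PySem.Chars.join ['\n', '\n'] ((bs.map (PySem.Str.join "\n")).map String.toList) := by
  match bs with
  | [p] =>
    rw [cmcInterB]
    simp only [List.map_cons, List.map_nil, PySem.Chars.join_singleton]
    rw [PySem.Str.toList_join]
    rfl
  | p :: q :: ps =>
    have hp : p ≠ [] := hb p (by simp)
    have hrest : cmcInterB (q :: ps) ≠ [] :=
      interB_ne_nil _ (fun b hbm => hb b (by simp [hbm])) (by simp)
    rw [cmcInterB, List.append_assoc, List.map_append,
      chars_join_append ['\n'] (p.map String.toList)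
        (([""] ++ cmcInterB (q :: ps)).map String.toList)
        (by simpa using hp) (by simp)]
    have hmap : ([""] ++ cmcInterB (q :: ps)).map String.toList =
        [] :: (cmcInterB (q :: ps)).map String.toList := by simp
    rw [hmap]
    cases hic : (cmcInterB (q :: ps)).map String.toList with
    | nil => exact absurd (by simpa using hic) hrest
    | cons i is =>
      rw [PySem.Chars.join_cons_cons, ← hic,
        join_interB (q :: ps) (fun b hbm => hb b (by simp [hbm])) (by simp)]
      simp only [List.map_cons, PySem.Chars.join_cons_cons]
      rw [PySem.Str.toList_join]
      simp

-- B's paragraph strings are the joined blocks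
lemma paras_eq_map (L : List String) :
    cmcParas L = (cmcBlocks L).map (PySem.Str.join "\n") := by
  induction L using cmcBlocks.induct with
  | case1 => simp [cmcParas, cmcBlocks]
  | case2 ls ih => rw [cmcParas, cmcBlocks, if_pos rfl, if_pos rfl, ih]
  | case3 l ls hl ih => rw [cmcParas, cmcBlocks, if_neg hl, if_neg hl, ih, List.map_cons]

-- ===== VERDICT (by name: the statement is the Claim_ definition above) =====
theorem clean_markdown_content_spec : Claim_equal_clean_markdown_content := by
  intro content _
  unfold Spec_clean_markdown_content clean_markdown_content clean_markdown_content_alt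
  simp only []
  set L0 := (PySem.Chars.splitOn content.toList "\n".toList).map String.ofList with hL0
  rw [(foldA_eq_runs L0).1 [], List.nil_append,
    popLoop_eq_trim _ _ (le_refl _), trim_runs_eq_blocks, paras_eq_map]
  set L := L0.map PySem.Str.rstrip with hL
  by_cases hB : cmcBlocks L = []
  · rw [if_pos hB, hB, List.map_nil, if_pos rfl]
    rfl
  · have hbne := mem_blocks_ne_nil L
    have hjoin := join_interB (cmcBlocks L) hbne hB
    have hmapne : (cmcBlocks L).map (PySem.Str.join "\n") ≠ [] := by simp [hB]
    rw [if_neg hB, if_neg hmapne]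
    apply String.toList_inj.mp
    by_cases hh : L.head? = some ""
    · rw [if_pos hh, if_pos hh]
      rw [PySem.Str.toList_join,
        show ("\n".toList : List Char) = ['\n'] from rfl,
        show (([""] ++ cmcInterB (cmcBlocks L)).map String.toList) =
          [] :: (cmcInterB (cmcBlocks L)).map String.toList from by simp]
      cases hic : (cmcInterB (cmcBlocks L)).map String.toList with
      | nil =>
        exact absurd (by simpa using hic) (interB_ne_nil _ hbne hB)
      | cons i is =>
        rw [PySem.Chars.join_cons_cons]
        rw [← hic]
        rw [hjoin]
        simp [PySem.Str.toList_join]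
    · rw [if_neg hh, if_neg hh]
      rw [PySem.Str.toList_join, PySem.Str.toList_join,
        show ("\n".toList : List Char) = ['\n'] from rfl,
        show ("\n\n".toList : List Char) = ['\n', '\n'] from rfl,
        List.nil_append, hjoin]
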